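-- pv_equiv track=rewrite | github.com/Aqureshi106/Chatbot | Chatbot.py | find_prof
-- ===== SOURCE A (Python) =====
-- data = {  # example
--     "courses": {
--         "CS101": {"time": "10:00 AM", "classroom": "Room 101"},
--         "MATH102": {"time": "12:00 PM", "classroom": "Room 202"},
--     },
--     "professors": {"Smith": {"office": "Room 301", "hours": "2:00 PM - 4:00 PM"}},
--     "library": {
--         "hours": "8:00 AM - 8:00 PM",
--         "rules": "Books can be borrowed for 2 weeks.",
--     },
-- }
--
-- def find_prof(name: list) -> str:
--     name = [word.lower() for word in name]
--     name = [word.capitalize() for word in name]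
--     if any(check in name for check in data["professors"]):
--         for i in data["professors"]:
--             if i in name:
--                 prof = data["professors"][i]
--                 return "Prof.{0}'s office is at {1} with hours {2}.".format(
--                     i, prof["office"], prof["hours"]
--                 )
--     else:
--         return unclear()
--
-- def unclear() -> str:
--     return "My apologies, I didn't understand; may you rephrase?"
-- ===== SOURCE B (Python) =====
-- data = {  # example
--     "courses": {
--         "CS101": {"time": "10:00 AM", "classroom": "Room 101"},
--         "MATH102": {"time": "12:00 PM", "classroom": "Room 202"},
--     },
--     "professors": {"Smith": {"office": "Room 301", "hours": "2:00 PM - 4:00 PM"}},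
--     "library": {
--         "hours": "8:00 AM - 8:00 PM",
--         "rules": "Books can be borrowed for 2 weeks.",
--     },
-- }
--
-- def unclear() -> str:
--     return "My apologies, I didn't understand; may you rephrase?"
--
-- def find_prof(name: list) -> str:
--     profs = data["professors"]
--     for word in name:
--         key = word.lower().capitalize()
--         info = profs.get(key)
--         if info is not None:
--             return "Prof.{0}'s office is at {1} with hours {2}.".format(
--                 key, info["office"], info["hours"]
--             )
--     return unclear()
-- ===== Notes on version B (the rewrite author's own statement) =====
-- stated objective: alternative
-- what changed: Inverts the loops: instead of building two fully-normalized copies of the word list and scanning the professor-dict keys (any() pre-scan plus a second search loop), B makes a single pass over the input words, normalizing each word on the fly and doing one dict .get lookup per word, returning on the first hit.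
import Mathlib
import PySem

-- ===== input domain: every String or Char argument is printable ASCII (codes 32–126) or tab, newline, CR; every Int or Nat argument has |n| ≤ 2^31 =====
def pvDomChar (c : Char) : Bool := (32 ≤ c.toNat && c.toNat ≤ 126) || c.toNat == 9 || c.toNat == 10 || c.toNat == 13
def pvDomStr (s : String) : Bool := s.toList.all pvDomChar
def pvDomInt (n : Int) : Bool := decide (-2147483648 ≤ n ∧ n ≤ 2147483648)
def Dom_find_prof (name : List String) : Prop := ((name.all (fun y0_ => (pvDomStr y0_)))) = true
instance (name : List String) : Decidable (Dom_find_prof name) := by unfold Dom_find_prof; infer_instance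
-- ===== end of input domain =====

-- B inverts the loops: a single pass over the input words with a per-word normalization and dict lookup,
-- instead of A's two normalization passes plus any()-guarded scan of the professor keys (simpler decomposition; same result).

-- str.capitalize(): first char uppercased, the rest lowered (exact on ASCII)
def pyCapitalize (s : String) : String :=
  match s.toList with
  | [] => ""
  | c :: rest => String.ofList (PySem.Chars.upperChar c :: PySem.Chars.lower rest)

-- data["professors"] as an association list (key, (office, hours)) in insertion order
def profsData : List (String × String × String) :=
  [("Smith", "Room 301", "2:00 PM - 4:00 PM")]

def unclearMsg : String := "My apologies, I didn't understand; may you rephrase?"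

def profMsg (i office hours : String) : String :=
  "Prof." ++ i ++ "'s office is at " ++ office ++ " with hours " ++ hours ++ "."

-- ===== PORT A =====
-- the 'for i in data["professors"]' body: return on the first key i with i in name
def findProfLoopA (name : List String) : List (String × String × String) → String
  | [] => ""  -- unreachable: the loop is entered only when the any(...) guard holds
  | (i, office, hours) :: rest =>
    if name.contains i then profMsg i office hours else findProfLoopA name rest

def find_prof (name : List String) : String :=
  let name1 := name.map PySem.Str.lower
  let name2 := name1.map pyCapitalize
  if profsData.any (fun check => name2.contains check.1) then
    findProfLoopA name2 profsData
  else
    unclearMsg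

-- ===== PORT B =====
-- profs.get(key): first-match association-list lookup
def profsGet (key : String) : Option (String × String) :=
  (profsData.find? (fun p => p.1 == key)).map (fun p => p.2)

-- 'for word in name: key = word.lower().capitalize(); info = profs.get(key); if info is not None: return …'
def findProfLoopB : List String → String
  | [] => unclearMsg
  | word :: rest =>
    let key := pyCapitalize (PySem.Str.lower word)
    match profsGet key with
    | some (office, hours) => profMsg key office hours
    | none => findProfLoopB rest

def find_prof_alt (name : List String) : String :=
  findProfLoopB name

-- ===== PRECONDITION & SPEC =====
def Spec_find_prof (name : List String) (out : String) : Prop := out = find_prof_alt name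
instance (name : List String) (out : String) : Decidable (Spec_find_prof name out) := by unfold Spec_find_prof; infer_instance

-- ===== CLAIM (what is proved, stated in full; the proofs are below) =====
def Claim_equal_find_prof : Prop := ∀ (name : List String), Dom_find_prof name → Spec_find_prof name (find_prof name)

-- ===== LEMMAS AND PROOFS =====

-- B's single pass returns the message iff some word normalizes to "Smith"
theorem findProfLoopB_eq (ws : List String) :
    findProfLoopB ws =
      if (ws.map (fun w => pyCapitalize (PySem.Str.lower w))).contains "Smith" then
        profMsg "Smith" "Room 301" "2:00 PM - 4:00 PM"
      else unclearMsg := by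
  induction ws with
  | nil => simp [findProfLoopB]
  | cons w rest ih =>
    simp only [findProfLoopB, profsGet, profsData, List.find?, List.map_cons,
      List.contains_cons]
    by_cases h : pyCapitalize (PySem.Str.lower w) = "Smith"
    · simp [h]
    · have hb : ("Smith" == pyCapitalize (PySem.Str.lower w)) = false := by
        rw [beq_eq_false_iff_ne]; exact fun e => h e.symm
      rw [hb]
      simp [ih, eq_comm (a := "Smith")]

-- ===== VERDICT (by name: the statement is the Claim_ definition above) =====
theorem find_prof_spec : Claim_equal_find_prof := by
  intro name _
  unfold Spec_find_prof find_prof find_prof_alt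
  rw [findProfLoopB_eq]
  simp only [profsData, findProfLoopA, List.any_cons, List.any_nil, Bool.or_false,
    List.map_map, Function.comp_def]
  split_ifs <;> simp_all
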